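-- pv_equiv track=rewrite | github.com/zubie7a/Algorithms | CodeSignal/Arcade/The_Core/Level_10_Lab_Of_Transformation/083_Cipher_26.py | cipher26
-- ===== SOURCE A (Python) =====
-- def cipher26(message):
--     # A message was encrypted using the following cipher:
--     # Every letter a-z has a value 0-26.
--     # The i-th letter number is the sum of all previous letter numbers % 26.
--     # Because of this, every letter on the cipher depends on the previous one.
--     # How do we find the original message? This should be called 'decipher'.
--     prev_number = 0
--     result = ""
--
--     # For cipher26(message) = output, it should be so that:
--     # message = "taiaiaertkixquxjnfxxdh",
--     # output  = "thisisencryptedmessage".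
--     #
--     # letter 0: t -> 19 -> t;
--     # letter 1: th -> (19 + 7) % 26 -> 0 -> a;
--     # letter 2: thi -> (19 + 7 + 8) % 26 -> 8 -> i;
--     # ...etc
--
--     for char in message:
--         # Find what was needed to be added to the previous character number
--         # to get the value of the current ciphered character. Add 26 to the
--         # current number so that we can substract the previous one safely.
--         cur_number = ord(char) - ord('a') + 26
--         # After substracting the previous one, just do modulus 26 again.
--         orig_char = chr((cur_number - prev_number) % 26 + ord('a'))
--         # After finding the original character, keep appending it to result.
--         result += orig_char
--         # Keep storing only the previous character number.
--         prev_number = ord(char) - ord('a')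
--
--     return result
-- ===== SOURCE B (Python) =====
-- def cipher26(message):
--     # Decipher by forward simulation of the encryption instead of inverting it
--     # arithmetically: keep the running sum of the recovered plaintext codes and,
--     # for each ciphertext character, search for the unique letter whose
--     # encryption (running sum + its code, mod 26) matches that character.
--     out = []
--     total = 0
--     for char in message:
--         for x in range(26):
--             if (total + x) % 26 == (ord(char) - ord('a')) % 26:
--                 out.append(chr(x + ord('a')))
--                 total += x
--                 break
--     return "".join(out)
-- ===== Notes on version B (the rewrite author's own statement) =====
-- stated objective: alternative
-- what changed: Instead of inverting the cipher arithmetically with a carried previous code and (cur - prev) % 26, B deciphers by forward simulation: it maintains the running sum of recovered plaintext codes and, for each ciphertext character, searches the 26 letters for the one whose encryption matches it.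
import Mathlib
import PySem

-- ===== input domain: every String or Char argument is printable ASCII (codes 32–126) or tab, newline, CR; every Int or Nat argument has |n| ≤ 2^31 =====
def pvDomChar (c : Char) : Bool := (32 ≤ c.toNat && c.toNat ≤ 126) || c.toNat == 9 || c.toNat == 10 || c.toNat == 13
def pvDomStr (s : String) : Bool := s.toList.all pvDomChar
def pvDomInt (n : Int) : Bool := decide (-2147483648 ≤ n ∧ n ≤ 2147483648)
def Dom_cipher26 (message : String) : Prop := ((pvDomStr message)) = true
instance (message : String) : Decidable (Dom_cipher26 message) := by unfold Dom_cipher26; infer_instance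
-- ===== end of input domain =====

-- B deciphers by forward simulation (searching, per ciphertext char, for the letter whose
-- encryption matches) instead of A's arithmetic inversion with a carried previous code
-- (objective: alternative algorithm, same result).

-- ===== PORT A =====
-- fold carries (prev_number, result); each step appends chr((cur - prev) % 26 + 97)
def cipher26 (message : String) : String :=
  (message.toList.foldl
    (fun (st : Int × String) char =>
      let cur_number : Int := (char.toNat : Int) - 97 + 26
      let orig_char : Char := Char.ofNat (PySem.Int.mod (cur_number - st.1) 26 + 97).toNat
      ((char.toNat : Int) - 97, st.2 ++ String.ofList [orig_char]))
    (0, "")).2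

-- ===== PORT B =====
-- fold carries (total, out); the inner for-with-break is find? over range(26)
def cipher26_alt (message : String) : String :=
  String.ofList
    ((message.toList.foldl
      (fun (st : Int × List Char) char =>
        match (PySem.List.pyRange 0 26 1).find?
            (fun x => PySem.Int.mod (st.1 + x) 26 == PySem.Int.mod ((char.toNat : Int) - 97) 26) with
        | some x => (st.1 + x, st.2 ++ [Char.ofNat (x + 97).toNat])
        | none => st)
      (0, [])).2)

-- ===== PRECONDITION & SPEC =====
def Spec_cipher26 (message : String) (out : String) : Prop := out = cipher26_alt message
instance (message : String) (out : String) : Decidable (Spec_cipher26 message out) := by unfold Spec_cipher26; infer_instance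

-- ===== CLAIM (what is proved, stated in full; the proofs are below) =====
def Claim_equal_cipher26 : Prop := ∀ (message : String), Dom_cipher26 message → Spec_cipher26 message (cipher26 message)

-- ===== LEMMAS AND PROOFS =====

-- reference recurrence: the deciphered char list from carried previous code p
def pvG : List Char → Int → List Char
  | [], _ => []
  | c :: cs, p =>
    Char.ofNat (PySem.Int.mod (((c.toNat : Int) - 97) - p) 26 + 97).toNat
      :: pvG cs ((c.toNat : Int) - 97)

theorem pvMod26 (x : Int) : PySem.Int.mod (x + 26) 26 = PySem.Int.mod x 26 := by
  rw [PySem.Int.mod_eq_emod_of_pos (by norm_num : (0:Int) < 26),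
      PySem.Int.mod_eq_emod_of_pos (by norm_num : (0:Int) < 26)]
  exact Int.add_emod_right x 26

theorem pvFoldA (l : List Char) (p : Int) (acc : String) :
    (l.foldl
      (fun (st : Int × String) char =>
        let cur_number : Int := (char.toNat : Int) - 97 + 26
        let orig_char : Char := Char.ofNat (PySem.Int.mod (cur_number - st.1) 26 + 97).toNat
        ((char.toNat : Int) - 97, st.2 ++ String.ofList [orig_char]))
      (p, acc)).2 = acc ++ String.ofList (pvG l p) := by
  induction l generalizing p acc with
  | nil =>
      apply String.ext
      simp [pvG]
  | cons c cs ih =>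
      simp only [List.foldl_cons, pvG]
      rw [ih]
      have : ((c.toNat : Int) - 97 + 26) - p = (((c.toNat : Int) - 97) - p) + 26 := by ring
      rw [this, pvMod26]
      apply String.ext
      simp

-- find? returns m when the predicate holds exactly at m and m is in the list
theorem pvFindUnique {α : Type} (p : α → Bool) (l : List α) (m : α)
    (hmem : m ∈ l) (hpm : p m = true) (huniq : ∀ x ∈ l, p x = true → x = m) :
    l.find? p = some m := by
  induction l with
  | nil => cases hmem
  | cons a l' ih =>
      by_cases ha : p a = true
      · rw [List.find?_cons_of_pos ha, huniq a (List.mem_cons_self) ha]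
      · rw [List.find?_cons_of_neg (by simpa using ha)]
        rcases List.mem_cons.mp hmem with h | h
        · exact absurd (h ▸ hpm) ha
        · exact ih h (fun x hx => huniq x (List.mem_cons_of_mem _ hx))

-- the inner search: the unique x in range(26) whose encryption matches code c is (c - t) % 26
theorem pvFind26 (t c : Int) :
    (PySem.List.pyRange 0 26 1).find?
        (fun x => PySem.Int.mod (t + x) 26 == PySem.Int.mod c 26)
      = some (PySem.Int.mod (c - t) 26) := by
  have hR : PySem.List.pyRange 0 26 1 =
      [0,1,2,3,4,5,6,7,8,9,10,11,12,13,14,15,16,17,18,19,20,21,22,23,24,25] := by decide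
  have hb : 0 ≤ (c - t) % 26 ∧ (c - t) % 26 < 26 :=
    ⟨Int.emod_nonneg _ (by norm_num), Int.emod_lt_of_pos _ (by norm_num)⟩
  rw [hR]
  simp only [PySem.Int.mod_eq_emod_of_pos (by norm_num : (0:Int) < 26)]
  apply pvFindUnique
  · simp only [List.mem_cons, List.not_mem_nil, or_false]
    omega
  · simp only [beq_iff_eq]
    omega
  · intro x hx hpx
    simp only [List.mem_cons, List.not_mem_nil, or_false] at hx
    simp only [beq_iff_eq] at hpx
    omega

theorem pvFoldB (l : List Char) (t p : Int) (acc : List Char) (h : t % 26 = p % 26) :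
    (l.foldl
      (fun (st : Int × List Char) char =>
        match (PySem.List.pyRange 0 26 1).find?
            (fun x => PySem.Int.mod (st.1 + x) 26 == PySem.Int.mod ((char.toNat : Int) - 97) 26) with
        | some x => (st.1 + x, st.2 ++ [Char.ofNat (x + 97).toNat])
        | none => st)
      (t, acc)).2 = acc ++ pvG l p := by
  induction l generalizing t p acc with
  | nil => simp [pvG]
  | cons c cs ih =>
      rw [List.foldl_cons]
      have hm : PySem.Int.mod (((c.toNat : Int) - 97) - t) 26
          = PySem.Int.mod (((c.toNat : Int) - 97) - p) 26 := by
        rw [PySem.Int.mod_eq_emod_of_pos (by norm_num : (0:Int) < 26),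
            PySem.Int.mod_eq_emod_of_pos (by norm_num : (0:Int) < 26)]
        omega
      have hstep :
          (match (PySem.List.pyRange 0 26 1).find?
              (fun x => PySem.Int.mod ((t, acc).1 + x) 26 == PySem.Int.mod ((c.toNat : Int) - 97) 26) with
            | some x => ((t, acc).1 + x, (t, acc).2 ++ [Char.ofNat (x + 97).toNat])
            | none => (t, acc))
          = (t + PySem.Int.mod (((c.toNat : Int) - 97) - p) 26,
             acc ++ [Char.ofNat (PySem.Int.mod (((c.toNat : Int) - 97) - p) 26 + 97).toNat]) := by
        simp only [pvFind26, hm]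
      rw [hstep, ih _ ((c.toNat : Int) - 97) _
        (by
          rw [PySem.Int.mod_eq_emod_of_pos (by norm_num : (0:Int) < 26)]
          omega)]
      simp [pvG]

-- ===== VERDICT (by name: the statement is the Claim_ definition above) =====
theorem cipher26_spec : Claim_equal_cipher26 := by
  intro message _
  unfold Spec_cipher26 cipher26 cipher26_alt
  rw [pvFoldA, pvFoldB message.toList 0 0 [] rfl]
  apply String.ext
  simp
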